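-- pv_equiv track=rewrite | github.com/VolatileDream/advent-of-code | 2020/day-10/main.py | valids
-- ===== SOURCE A (Python) =====
-- def machine_rating(jolts):
--   return jolts[-1] + 3
--
-- def within(x, y, max_delta):
--   return abs(x - y) <= max_delta
--
-- def valids(jolts):
--   # For each item count the number of valid preceeding items
--   # Note: it can be at most 3, eg: 1 2 3 4 -> 4 has 3 options.
--
--   jolts_with_ends = list(jolts)
--   jolts_with_ends.insert(0, 0)
--   jolts_with_ends.append(machine_rating(jolts))
--
--   options = []
--   for i in range(1, len(jolts_with_ends)):
--     bottom = max(0, i - 3) # catch early items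
--
--     valid = 0
--     item = jolts_with_ends[i]
--
--     for j in range(bottom, i):
--       if within(jolts_with_ends[j], item, 3):
--         valid += 1
--
--     options.append(valid)
--
--   return options
-- ===== SOURCE B (Python) =====
-- def valids(jolts):
--   # Shift-and-compare in three staged whole-list passes: for each offset d in
--   # (1, 2, 3) compare the padded list with itself shifted by d, then sum the
--   # aligned 0/1 hit lists elementwise -- no per-element inner window loop.
--   xs = [0] + list(jolts) + [jolts[-1] + 3]
--   n = len(xs) - 1
--   total = [0] * n
--   for d in (1, 2, 3):
--     hits = [1 if abs(a - b) <= 3 else 0 for a, b in zip(xs, xs[d:])]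
--     total = [t + h for t, h in zip(total, [0] * (d - 1) + hits)]
--   return total
-- ===== Notes on version B (the rewrite author's own statement) =====
-- stated objective: alternative
-- what changed: Replaces A's per-element inner window scan (for each position, loop j from max(0,i-3) to i) with three staged whole-list passes: for each shift d in 1..3 the padded list is compared elementwise against itself shifted by d, and the aligned 0/1 hit lists are summed.
-- outside the precondition, e.g. on valids([]): A raises IndexError, B raises IndexError
import Mathlib
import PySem

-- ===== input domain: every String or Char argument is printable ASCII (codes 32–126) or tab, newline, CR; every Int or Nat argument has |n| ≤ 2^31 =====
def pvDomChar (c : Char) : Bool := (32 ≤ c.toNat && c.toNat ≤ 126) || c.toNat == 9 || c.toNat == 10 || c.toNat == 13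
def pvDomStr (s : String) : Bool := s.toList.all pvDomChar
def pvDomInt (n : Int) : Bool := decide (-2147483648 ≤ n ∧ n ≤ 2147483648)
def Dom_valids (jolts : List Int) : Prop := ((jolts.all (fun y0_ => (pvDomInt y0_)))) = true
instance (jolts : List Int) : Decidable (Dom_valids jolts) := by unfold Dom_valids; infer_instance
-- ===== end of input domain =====

-- B replaces A's per-element inner window scan by three staged whole-list shift-and-compare
-- passes whose aligned 0/1 hit lists are summed elementwise (alternative decomposition, same cost).

-- ===== PORT A =====
-- machine_rating: jolts[-1] + 3 (pyGetD is exact under Pre_valids: jolts ≠ [])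
def machineRating (jolts : List Int) : Int := PySem.List.pyGetD jolts (-1) 0 + 3

def pyWithin (x y maxDelta : Int) : Bool := |x - y| ≤ maxDelta

def valids (jolts : List Int) : List Int :=
  let jwe : List Int := 0 :: (jolts ++ [machineRating jolts])
  (PySem.List.pyRange 1 (jwe.length : Int) 1).foldl (fun options i =>
    let bottom : Int := max 0 (i - 3)
    let item : Int := PySem.List.pyGetD jwe i 0
    let valid : Int := (PySem.List.pyRange bottom i 1).foldl (fun valid j =>
      if pyWithin (PySem.List.pyGetD jwe j 0) item 3 then valid + 1 else valid) 0
    options ++ [valid]) []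

-- ===== PORT B =====
-- three staged passes: for d in (1,2,3), hits = shift-by-d comparison list, total += aligned hits
def valids_alt (jolts : List Int) : List Int :=
  let xs : List Int := 0 :: (jolts ++ [PySem.List.pyGetD jolts (-1) 0 + 3])
  let n : Nat := xs.length - 1
  [1, 2, 3].foldl (fun total (d : Nat) =>
    let hits : List Int := (xs.zip (PySem.List.slice xs (some (d : Int)) none)).map
      (fun p => if |p.1 - p.2| ≤ 3 then (1 : Int) else 0)
    ((total.zip (List.replicate (d - 1) (0 : Int) ++ hits)).map (fun p => p.1 + p.2)))
    (List.replicate n (0 : Int))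

-- ===== PRECONDITION & SPEC =====
-- Pre_ excludes only the empty list, on which Python A raises IndexError (jolts[-1]).
def Pre_valids (jolts : List Int) : Prop := jolts ≠ []
instance (jolts : List Int) : Decidable (Pre_valids jolts) := by unfold Pre_valids; infer_instance
def pvWitness_valids : List Int := [1]

def Spec_valids (jolts : List Int) (out : List Int) : Prop := out = valids_alt jolts
instance (jolts : List Int) (out : List Int) : Decidable (Spec_valids jolts out) := by unfold Spec_valids; infer_instance

-- ===== CLAIM (what is proved, stated in full; the proofs are below) =====
def Claim_equal_valids : Prop := ∀ (jolts : List Int), Dom_valids jolts → Pre_valids jolts → Spec_valids jolts (valids jolts)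

-- ===== LEMMAS AND PROOFS =====
def eD (xs : List Int) (i d : Nat) : Int :=
  if d ≤ i ∧ |xs.getD (i - d) 0 - xs.getD i 0| ≤ 3 then 1 else 0

theorem vec_getD (xs : List Int) (d m : Nat) (hd1 : 1 ≤ d) (hd : d ≤ xs.length)
    (hm : m < xs.length - 1) :
    (List.replicate (d-1) (0:Int) ++ (xs.zip (xs.drop d)).map
      (fun p => if |p.1 - p.2| ≤ 3 then (1:Int) else 0)).getD m 0 = eD xs (m+1) d := by
  have hlenz : ((xs.zip (xs.drop d)).map
      (fun p => if |p.1 - p.2| ≤ 3 then (1:Int) else 0)).length = xs.length - d := by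
    simp
  by_cases hc : m < d - 1
  · rw [List.getD_append _ _ _ _ (by simp; omega), List.getD_replicate _ (by omega)]
    simp only [eD]
    rw [if_neg (by omega)]
  · rw [List.getD_append_right _ _ _ _ (by simp; omega)]
    have hlt : m - (List.replicate (d-1) (0:Int)).length < ((xs.zip (xs.drop d)).map
      (fun p => if |p.1 - p.2| ≤ 3 then (1:Int) else 0)).length := by
      simp; omega
    rw [List.getD_eq_getElem _ _ hlt]
    simp only [List.getElem_map, List.getElem_zip, List.getElem_drop, List.length_replicate]
    have h1 : m - (d - 1) = m + 1 - d := by omega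
    have h2 : d + (m - (d - 1)) = m + 1 := by omega
    simp only [h1]
    have hb1 : m + 1 - d < xs.length := by omega
    have hb2 : m + 1 < xs.length := by omega
    simp [eD, show d ≤ m + 1 by omega, List.getElem?_eq_getElem hb1, List.getElem?_eq_getElem hb2]

def specL (xs : List Int) : List Int :=
  (List.range (xs.length - 1)).map (fun m => eD xs (m + 1) 1 + eD xs (m + 1) 2 + eD xs (m + 1) 3)

theorem vec_getElem (xs : List Int) (d m : Nat) (hd1 : 1 ≤ d) (hd : d ≤ xs.length)
    (hm : m < xs.length - 1)
    (hb : m < (List.replicate (d-1) (0:Int) ++ (xs.zip (xs.drop d)).map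
      (fun p => if |p.1 - p.2| ≤ 3 then (1:Int) else 0)).length) :
    (List.replicate (d-1) (0:Int) ++ (xs.zip (xs.drop d)).map
      (fun p => if |p.1 - p.2| ≤ 3 then (1:Int) else 0))[m]'hb = eD xs (m+1) d := by
  rw [← List.getD_eq_getElem _ 0 hb]
  exact vec_getD xs d m hd1 hd hm

theorem valids_alt_eq_spec (jolts : List Int) (h : jolts ≠ []) :
    valids_alt jolts = specL (0 :: (jolts ++ [PySem.List.pyGetD jolts (-1) 0 + 3])) := by
  have hj : 1 ≤ jolts.length := List.length_pos_iff.mpr h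
  simp only [valids_alt, List.foldl_cons, List.foldl_nil, PySem.List.slice_from_natCast]
  set xs : List Int := 0 :: (jolts ++ [PySem.List.pyGetD jolts (-1) 0 + 3]) with hxs
  have hlen : 3 ≤ xs.length := by simp [hxs]; omega
  apply List.ext_getElem
  · simp [specL]; omega
  · intro i h1 h2
    have hi : i < xs.length - 1 := by
      have := h2; simpa [specL] using this
    simp only [List.getElem_map, List.getElem_zip, specL, List.getElem_range,
      List.getElem_replicate]
    rw [vec_getElem xs 1 i (by omega) (by omega) hi (by simp; omega),
        vec_getElem xs 2 i (by omega) (by omega) hi (by simp; omega),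
        vec_getElem xs 3 i (by omega) (by omega) hi (by simp; omega)]
    omega

theorem inner_eq (xs : List Int) (k : Nat) (hk : k + 1 < xs.length) :
    (PySem.List.pyRange (max 0 ((1 + (k:Int)) - 3)) (1 + (k:Int)) 1).foldl
      (fun v j => if pyWithin (PySem.List.pyGetD xs j 0) (PySem.List.pyGetD xs (1 + (k:Int)) 0) 3 then v + 1 else v) 0
    = eD xs (k+1) 1 + eD xs (k+1) 2 + eD xs (k+1) 3 := by
  match k with
  | 0 =>
    rw [show max 0 ((1 + ((0:Nat):Int)) - 3) = 0 by simp]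
    rw [PySem.List.pyRange_one_cons (by norm_num), PySem.List.pyRange_one_eq_nil (by norm_num)]
    simp only [List.foldl_cons, List.foldl_nil, pyWithin]
    rw [PySem.List.pyGetD_of_nonneg _ _ (by norm_num), PySem.List.pyGetD_of_nonneg _ _ (by norm_num)]
    simp only [show ((0:Int)).toNat = 0 by omega, show ((1:Int) + ((0:Nat):Int)).toNat = 1 by omega]
    simp only [eD, show 0+1-1 = 0 by omega, show (1:Nat) ≤ 0+1 by omega, true_and, decide_eq_true_eq]
    have h2 : ¬ ((2:Nat) ≤ 0+1) := by omega
    have h3 : ¬ ((3:Nat) ≤ 0+1) := by omega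
    simp only [h2, h3, false_and, if_false]
    split_ifs <;> omega
  | 1 =>
    rw [show max 0 ((1 + ((1:Nat):Int)) - 3) = 0 by simp]
    rw [PySem.List.pyRange_one_cons (by norm_num), PySem.List.pyRange_one_cons (by norm_num),
        PySem.List.pyRange_one_eq_nil (by norm_num)]
    simp only [List.foldl_cons, List.foldl_nil, pyWithin]
    rw [PySem.List.pyGetD_of_nonneg _ _ (by norm_num), PySem.List.pyGetD_of_nonneg _ _ (by norm_num),
        PySem.List.pyGetD_of_nonneg _ _ (by norm_num)]
    simp only [show ((0:Int)).toNat = 0 by omega, show ((0:Int)+1).toNat = 1 by omega,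
      show ((1:Int) + ((1:Nat):Int)).toNat = 2 by omega]
    simp only [eD, show 1+1-1 = 1 by omega, show 1+1-2 = 0 by omega,
      show (1:Nat) ≤ 1+1 by omega, show (2:Nat) ≤ 1+1 by omega, true_and, decide_eq_true_eq]
    have h3 : ¬ ((3:Nat) ≤ 1+1) := by omega
    simp only [h3, false_and, if_false]
    split_ifs <;> omega
  | (n+2) =>
    have hmax : max 0 ((1 + ((n+2:Nat):Int)) - 3) = ((n:Nat):Int) := by push_cast; omega
    rw [hmax]
    rw [PySem.List.pyRange_one_cons (by push_cast; omega), PySem.List.pyRange_one_cons (by push_cast; omega),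
        PySem.List.pyRange_one_cons (by push_cast; omega), PySem.List.pyRange_one_eq_nil (by push_cast; omega)]
    simp only [List.foldl_cons, List.foldl_nil, pyWithin]
    rw [PySem.List.pyGetD_of_nonneg _ _ (by positivity), PySem.List.pyGetD_of_nonneg _ _ (by positivity),
        PySem.List.pyGetD_of_nonneg _ _ (by positivity), PySem.List.pyGetD_of_nonneg _ _ (by positivity)]
    simp only [show (((n:Nat):Int)).toNat = n by omega, show (((n:Nat):Int)+1).toNat = n+1 by omega,
      show (((n:Nat):Int)+1+1).toNat = n+2 by omega,
      show ((1:Int) + ((n+2:Nat):Int)).toNat = n+3 by push_cast; omega]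
    simp only [eD, show n+2+1-1 = n+2 by omega, show n+2+1-2 = n+1 by omega,
      show n+2+1-3 = n by omega, show n+2+1 = n+3 by omega,
      show (1:Nat) ≤ n+3 by omega, show (2:Nat) ≤ n+3 by omega,
      show (3:Nat) ≤ n+3 by omega, true_and, decide_eq_true_eq]
    split_ifs <;> omega

theorem valids_eq_spec (jolts : List Int) :
    valids jolts = specL (0 :: (jolts ++ [machineRating jolts])) := by
  simp only [valids]
  rw [PySem.List.foldl_append_singleton_eq_map]
  set xs : List Int := 0 :: (jolts ++ [machineRating jolts]) with hxs
  rw [PySem.List.pyRange_one]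
  rw [List.map_map]
  have hl : (((xs.length:Int)) - 1).toNat = xs.length - 1 := by
    simp [hxs]
  rw [hl]
  unfold specL
  refine List.map_congr_left ?_
  intro k hk
  have hk' : k < xs.length - 1 := List.mem_range.mp hk
  simpa using inner_eq xs k (by omega)

-- ===== VERDICT (by name: the statement is the Claim_ definition above) =====
theorem valids_spec : Claim_equal_valids := by
  intro jolts _ hpre
  unfold Spec_valids
  rw [valids_eq_spec, valids_alt_eq_spec _ hpre, machineRating]
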